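-- pv_equiv track=rewrite | github.com/aparnakr/pos-analysis | threshold.py | trinom_coefficient
-- ===== SOURCE A (Python) =====
-- trinom_memo = {}
--
-- def trinom_coefficient(n,c1,c2):
--     if (n,c1,c2) in trinom_memo:
--         return trinom_memo[(n,c1,c2)]
--     result = 1
--     for i in range(n - c1 - c2 + 1, n+1):
--         result *= i
--     for i in range(1, c1+1):
--         result //= i
--     for i in range(1, c2+1):
--         result //= i
--     trinom_memo[(n,c1,c2)] = result
--     return result
-- ===== SOURCE B (Python) =====
-- # B: trinomial coefficient as C(n, c1) * C(n - c1, c2), each binomial built by an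
-- # interleaved multiply-then-floor-divide loop (exact at every step), instead of A's
-- # single long numerator product followed by two factorial division loops.
-- def trinom_coefficient(n, c1, c2):
--     acc = 1
--     for i in range(1, c1 + 1):
--         acc = acc * (n - c1 + i) // i
--     acc2 = 1
--     for i in range(1, c2 + 1):
--         acc2 = acc2 * (n - c1 - c2 + i) // i
--     return acc * acc2
-- ===== Notes on version B (the rewrite author's own statement) =====
-- stated objective: alternative
-- what changed: B computes the trinomial as C(n,c1)*C(n-c1,c2) with two interleaved multiply/floor-divide binomial loops (each division step is exact), instead of A's single long numerator product over range(n-c1-c2+1, n+1) followed by two separate factorial division loops; the memo is dropped since it never changes the value.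
-- outside the precondition, e.g. on trinom_coefficient(4, -1, 2): A returns 2, B returns 10; on trinom_coefficient(5, 2, -1): A returns 2, B returns 10
import Mathlib
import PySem

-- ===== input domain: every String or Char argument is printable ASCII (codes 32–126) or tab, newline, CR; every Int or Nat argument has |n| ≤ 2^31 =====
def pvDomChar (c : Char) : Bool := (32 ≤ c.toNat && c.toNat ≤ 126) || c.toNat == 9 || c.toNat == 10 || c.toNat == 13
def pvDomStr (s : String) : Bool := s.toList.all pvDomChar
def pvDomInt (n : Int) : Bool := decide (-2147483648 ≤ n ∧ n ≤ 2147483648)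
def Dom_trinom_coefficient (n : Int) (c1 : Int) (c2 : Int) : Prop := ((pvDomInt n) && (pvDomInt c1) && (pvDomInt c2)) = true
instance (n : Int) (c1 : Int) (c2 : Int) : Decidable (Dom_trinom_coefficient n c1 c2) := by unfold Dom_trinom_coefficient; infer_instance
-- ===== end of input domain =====

-- B replaces A's long numerator product + two factorial division loops by two interleaved
-- multiply/floor-divide binomial loops (C(n,c1)*C(n-c1,c2)); an alternative of the same cost class.
-- A's memo cache is dropped in the port: the function is pure, so the cache never changes the return value.

-- ===== PORT A =====
def trinom_coefficient (n : Int) (c1 : Int) (c2 : Int) : Int :=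
  let result : Int := (PySem.List.pyRange (n - c1 - c2 + 1) (n + 1)).foldl (fun r i => r * i) 1
  let result : Int := (PySem.List.pyRange 1 (c1 + 1)).foldl (fun r i => PySem.Int.floordiv r i) result
  let result : Int := (PySem.List.pyRange 1 (c2 + 1)).foldl (fun r i => PySem.Int.floordiv r i) result
  result

-- ===== PORT B =====
def trinom_coefficient_alt (n : Int) (c1 : Int) (c2 : Int) : Int :=
  let acc : Int := (PySem.List.pyRange 1 (c1 + 1)).foldl (fun a i => PySem.Int.floordiv (a * (n - c1 + i)) i) 1
  let acc2 : Int := (PySem.List.pyRange 1 (c2 + 1)).foldl (fun a i => PySem.Int.floordiv (a * (n - c1 - c2 + i)) i) 1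
  acc * acc2

-- ===== PRECONDITION & SPEC =====
-- Pre_ restricts to the natural domain of counts: it excludes inputs where exactly one of c1, c2 is
-- negative (and the other positive); there A skips one division loop and floor-divides a mismatched
-- range, an accident of its implementation that neither program's value specifies.
def Pre_trinom_coefficient (n : Int) (c1 : Int) (c2 : Int) : Prop :=
  (0 ≤ c1 ∧ 0 ≤ c2) ∨ (c1 ≤ 0 ∧ c2 ≤ 0)
instance (n : Int) (c1 : Int) (c2 : Int) : Decidable (Pre_trinom_coefficient n c1 c2) := by
  unfold Pre_trinom_coefficient; infer_instance

def pvWitness_trinom_coefficient : Int × Int × Int := (4, 1, 2)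

def Spec_trinom_coefficient (n : Int) (c1 : Int) (c2 : Int) (out : Int) : Prop := out = trinom_coefficient_alt n c1 c2
instance (n : Int) (c1 : Int) (c2 : Int) (out : Int) : Decidable (Spec_trinom_coefficient n c1 c2 out) := by unfold Spec_trinom_coefficient; infer_instance

-- ===== CLAIM (what is proved, stated in full; the proofs are below) =====
def Claim_equal_trinom_coefficient : Prop := ∀ (n : Int) (c1 : Int) (c2 : Int), Dom_trinom_coefficient n c1 c2 → Pre_trinom_coefficient n c1 c2 → Spec_trinom_coefficient n c1 c2 (trinom_coefficient n c1 c2)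

-- ===== LEMMAS AND PROOFS =====

-- prodC m k = (m+1)(m+2)⋯(m+k), the product of k consecutive integers above m.
def prodC (m : Int) : Nat → Int
  | 0 => 1
  | k + 1 => prodC m k * (m + (k + 1))

lemma prodC_natCast (p : Nat) : ∀ k : Nat, prodC (p : Int) k = ((p + 1).ascFactorial k : Int) := by
  intro k
  induction k with
  | zero => simp [prodC]
  | succ k ih =>
      rw [prodC, ih, Nat.ascFactorial_succ]
      push_cast
      ring

lemma prodC_neg (k p : Nat) : prodC (-(p : Int) - k) k = (-1) ^ k * (p.ascFactorial k : Int) := by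
  induction k generalizing p with
  | zero => simp [prodC]
  | succ k ih =>
      have h1 : (-(p : Int) - ((k + 1 : Nat) : Int)) = (-((p + 1 : Nat) : Int) - k) := by push_cast; ring
      have h2 : p.ascFactorial (k + 1) = p * (p + 1).ascFactorial k := by
        rw [Nat.ascFactorial_succ, ← Nat.succ_ascFactorial]
      rw [prodC]
      simp only [h1]
      rw [ih (p + 1), h2]
      push_cast
      ring

lemma prodC_eq_zero : ∀ (k : Nat) (m : Int), -(k : Int) ≤ m → m < 0 → prodC m k = 0 := by
  intro k
  induction k with
  | zero => intro m h1 h2; omega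
  | succ k ih =>
      intro m h1 h2
      by_cases h : m + (k + 1) = 0
      · rw [prodC, h]; ring
      · rw [prodC, ih m (by push_cast at h1 ⊢; omega) h2]; ring

lemma factorial_dvd_prodC (m : Int) (k : Nat) : (k.factorial : Int) ∣ prodC m k := by
  by_cases hm : 0 ≤ m
  · obtain ⟨p, rfl⟩ := Int.eq_ofNat_of_zero_le hm
    rw [prodC_natCast]
    exact_mod_cast Int.natCast_dvd_natCast.mpr (Nat.factorial_dvd_ascFactorial (p + 1) k)
  · by_cases hk : -(k : Int) ≤ m
    · rw [prodC_eq_zero k m hk (by omega)]; exact Dvd.intro 0 rfl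
    · -- m < -k : all factors negative; shift to a natural ascFactorial
      have hp : 0 ≤ -(m + k) := by omega
      obtain ⟨p, hpe⟩ := Int.eq_ofNat_of_zero_le hp
      have hme : m = -(p : Int) - k := by omega
      rw [hme, prodC_neg]
      exact Dvd.dvd.mul_left
        (by exact_mod_cast Int.natCast_dvd_natCast.mpr (Nat.factorial_dvd_ascFactorial p k)) _

-- A's multiplication loop: folding (·*·) over range(m+1, m+1+k) multiplies by prodC m k.
lemma foldl_mul_pyRange (k : Nat) : ∀ (m r : Int),
    (PySem.List.pyRange (m + 1) (m + 1 + (k : Int))).foldl (fun x i => x * i) r = r * prodC m k := by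
  induction k with
  | zero => intro m r; simp [prodC]
  | succ k ih =>
      intro m r
      have he : m + 1 + ((k + 1 : Nat) : Int) = (m + 1 + (k : Int)) + 1 := by push_cast; ring
      rw [he, PySem.List.pyRange_one_succ_right (by omega), List.foldl_append, ih m r]
      simp only [List.foldl_cons, List.foldl_nil, prodC]
      ring

-- A's division loops: floor-dividing by 1..k divides exactly by k! when k! divides the start value.
lemma foldl_div_pyRange (k : Nat) : ∀ (v : Int), ((k.factorial : Int) ∣ v) →
    (PySem.List.pyRange 1 ((k : Int) + 1)).foldl (fun r i => PySem.Int.floordiv r i) v * (k.factorial : Int) = v := by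
  induction k with
  | zero => intro v _; simp [PySem.List.pyRange]
  | succ k ih =>
      intro v hdvd
      have hfac : ((k + 1).factorial : Int) = (k.factorial : Int) * ((k : Int) + 1) := by
        rw [Nat.factorial_succ]; push_cast; ring
      have hk : (k.factorial : Int) ∣ v :=
        dvd_trans (by exact_mod_cast Nat.factorial_dvd_factorial (Nat.le_succ k)) hdvd
      have he : ((k + 1 : Nat) : Int) + 1 = ((k : Int) + 1) + 1 := by push_cast; ring
      rw [he, PySem.List.pyRange_one_succ_right (by omega), List.foldl_append]
      set w := (PySem.List.pyRange 1 ((k : Int) + 1)).foldl (fun r i => PySem.Int.floordiv r i) v with hw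
      have hwv : w * (k.factorial : Int) = v := ih v hk
      have hdw : ((k : Int) + 1) ∣ w := by
        rcases hdvd with ⟨c, hc⟩
        have : w * (k.factorial : Int) = ((k.factorial : Int) * ((k : Int) + 1)) * c := by
          rw [hwv, hc, hfac]
        exact ⟨c, by
          have hne : (k.factorial : Int) ≠ 0 := by exact_mod_cast k.factorial_ne_zero
          apply mul_right_cancel₀ hne
          calc w * ((k.factorial : Int)) = ((k.factorial : Int) * ((k : Int) + 1)) * c := this
            _ = (((k : Int) + 1) * c) * (k.factorial : Int) := by ring⟩
      simp only [List.foldl_cons, List.foldl_nil]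
      rw [PySem.Int.floordiv_eq_ediv_of_pos (by omega), hfac]
      calc w / ((k : Int) + 1) * ((k.factorial : Int) * ((k : Int) + 1))
          = (w / ((k : Int) + 1) * ((k : Int) + 1)) * (k.factorial : Int) := by ring
        _ = w * (k.factorial : Int) := by rw [Int.ediv_mul_cancel hdw]
        _ = v := hwv

-- B's binomial loop: the interleaved multiply/floor-divide pass computes prodC m k / k! exactly.
lemma foldl_binom_pyRange (m : Int) (k : Nat) :
    (PySem.List.pyRange 1 ((k : Int) + 1)).foldl (fun a i => PySem.Int.floordiv (a * (m + i)) i) 1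
      * (k.factorial : Int) = prodC m k := by
  induction k with
  | zero => simp [PySem.List.pyRange, prodC]
  | succ k ih =>
      have hfac : ((k + 1).factorial : Int) = (k.factorial : Int) * ((k : Int) + 1) := by
        rw [Nat.factorial_succ]; push_cast; ring
      have he : ((k + 1 : Nat) : Int) + 1 = ((k : Int) + 1) + 1 := by push_cast; ring
      rw [he, PySem.List.pyRange_one_succ_right (by omega), List.foldl_append]
      set w := (PySem.List.pyRange 1 ((k : Int) + 1)).foldl (fun a i => PySem.Int.floordiv (a * (m + i)) i) 1 with hw
      have hne : (k.factorial : Int) ≠ 0 := by exact_mod_cast k.factorial_ne_zero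
      have hdvd : ((k + 1).factorial : Int) ∣ prodC m (k + 1) := factorial_dvd_prodC m (k + 1)
      have hdw : ((k : Int) + 1) ∣ w * (m + ((k : Int) + 1)) := by
        rcases hdvd with ⟨c, hc⟩
        refine ⟨c, mul_right_cancel₀ hne ?_⟩
        calc w * (m + ((k : Int) + 1)) * (k.factorial : Int)
            = (w * (k.factorial : Int)) * (m + ((k : Int) + 1)) := by ring
          _ = prodC m (k + 1) := by rw [ih, prodC]
          _ = ((k : Int) + 1) * c * (k.factorial : Int) := by rw [hc, hfac]; ring
      simp only [List.foldl_cons, List.foldl_nil]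
      rw [PySem.Int.floordiv_eq_ediv_of_pos (by omega), hfac]
      calc w * (m + ((k : Int) + 1)) / ((k : Int) + 1) * ((k.factorial : Int) * ((k : Int) + 1))
          = (w * (m + ((k : Int) + 1)) / ((k : Int) + 1) * ((k : Int) + 1)) * (k.factorial : Int) := by
            ring
        _ = (w * (m + ((k : Int) + 1))) * (k.factorial : Int) := by rw [Int.ediv_mul_cancel hdw]
        _ = (w * (k.factorial : Int)) * (m + ((k : Int) + 1)) := by ring
        _ = prodC m (k + 1) := by rw [ih, prodC]

lemma prodC_add (m : Int) (b : Nat) : ∀ a : Nat, prodC m (b + a) = prodC m b * prodC (m + b) a := by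
  intro a
  induction a with
  | zero => simp [prodC]
  | succ a ih =>
      have : b + (a + 1) = (b + a) + 1 := by omega
      rw [this, prodC, ih, prodC]
      push_cast
      ring

lemma pyRange_empty_of_le (a b : Int) (h : b ≤ a) : PySem.List.pyRange a b = [] := by
  simp [PySem.List.pyRange]
  omega

-- ===== VERDICT (by name: the statement is the Claim_ definition above) =====
theorem trinom_coefficient_spec : Claim_equal_trinom_coefficient := by
  intro n c1 c2 _ hpre
  unfold Spec_trinom_coefficient trinom_coefficient trinom_coefficient_alt
  rcases hpre with ⟨h1, h2⟩ | ⟨h1, h2⟩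
  · -- both counts nonnegative
    obtain ⟨a, rfl⟩ := Int.eq_ofNat_of_zero_le h1
    obtain ⟨b, rfl⟩ := Int.eq_ofNat_of_zero_le h2
    show (PySem.List.pyRange 1 ((b : Int) + 1)).foldl (fun r i => PySem.Int.floordiv r i)
        ((PySem.List.pyRange 1 ((a : Int) + 1)).foldl (fun r i => PySem.Int.floordiv r i)
          ((PySem.List.pyRange (n - (a : Int) - (b : Int) + 1) (n + 1)).foldl (fun r i => r * i) 1))
      = (PySem.List.pyRange 1 ((a : Int) + 1)).foldl
          (fun x i => PySem.Int.floordiv (x * (n - (a : Int) + i)) i) 1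
        * (PySem.List.pyRange 1 ((b : Int) + 1)).foldl
          (fun x i => PySem.Int.floordiv (x * (n - (a : Int) - (b : Int) + i)) i) 1
    set s : Int := n - (a : Int) - (b : Int) with hs
    rw [show n + 1 = s + 1 + ((a + b : Nat) : Int) by push_cast; omega,
      foldl_mul_pyRange (a + b) s 1, one_mul]
    -- divisibility facts
    have hab : ((a + b).factorial : Int) ∣ prodC s (a + b) := factorial_dvd_prodC s (a + b)
    have hAdvd1 : (a.factorial : Int) ∣ prodC s (a + b) :=
      dvd_trans (by exact_mod_cast Nat.factorial_dvd_factorial (Nat.le_add_right a b)) hab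
    have habfac : ((a.factorial : Int)) * (b.factorial : Int) ∣ prodC s (a + b) :=
      dvd_trans (by exact_mod_cast Nat.factorial_mul_factorial_dvd_factorial_add a b) hab
    have hane : (a.factorial : Int) ≠ 0 := by exact_mod_cast a.factorial_ne_zero
    have hbne : (b.factorial : Int) ≠ 0 := by exact_mod_cast b.factorial_ne_zero
    -- A's two division loops
    set v1 := (PySem.List.pyRange 1 ((a : Int) + 1)).foldl (fun r i => PySem.Int.floordiv r i)
      (prodC s (a + b)) with hv1
    have hA2 : v1 * (a.factorial : Int) = prodC s (a + b) := foldl_div_pyRange a _ hAdvd1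
    have hBdvd2 : (b.factorial : Int) ∣ v1 := by
      rcases habfac with ⟨c, hc⟩
      refine ⟨c, mul_right_cancel₀ hane ?_⟩
      calc v1 * (a.factorial : Int) = prodC s (a + b) := hA2
        _ = (b.factorial : Int) * c * (a.factorial : Int) := by rw [hc]; ring
    set v2 := (PySem.List.pyRange 1 ((b : Int) + 1)).foldl (fun r i => PySem.Int.floordiv r i) v1
      with hv2
    have hA3 : v2 * (b.factorial : Int) = v1 := foldl_div_pyRange b _ hBdvd2
    -- B's two loops
    have hB1 : (PySem.List.pyRange 1 ((a : Int) + 1)).foldl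
        (fun x i => PySem.Int.floordiv (x * (n - (a : Int) + i)) i) 1 * (a.factorial : Int)
        = prodC (n - (a : Int)) a := foldl_binom_pyRange (n - (a : Int)) a
    have hB2 : (PySem.List.pyRange 1 ((b : Int) + 1)).foldl
        (fun x i => PySem.Int.floordiv (x * (s + i)) i) 1 * (b.factorial : Int)
        = prodC s b := foldl_binom_pyRange s b
    -- assemble: both sides times a!·b! equal prodC s (a+b)
    have hsplit : prodC s (a + b) = prodC s b * prodC (n - (a : Int)) a := by
      have hna : n - (a : Int) = s + (b : Int) := by omega
      rw [hna, Nat.add_comm a b, prodC_add]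
    refine mul_right_cancel₀ (mul_ne_zero hane hbne) ?_
    calc v2 * ((a.factorial : Int) * (b.factorial : Int))
        = (v2 * (b.factorial : Int)) * (a.factorial : Int) := by ring
      _ = prodC s (a + b) := by rw [hA3, hA2]
      _ = prodC s b * prodC (n - (a : Int)) a := hsplit
      _ = _ * ((a.factorial : Int) * (b.factorial : Int)) := by rw [← hB1, ← hB2]; ring
  · -- both counts nonpositive: every loop is over an empty range
    rw [pyRange_empty_of_le 1 (c1 + 1) (by omega), pyRange_empty_of_le 1 (c2 + 1) (by omega),
      pyRange_empty_of_le (n - c1 - c2 + 1) (n + 1) (by omega)]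
    simp
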